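-- pv_equiv track=rewrite | github.com/emmacwatts/AutoTagsCRISPR | Giulia_20230804.py | translate_nucleotide_position_into_codon_position
-- ===== SOURCE A (Python) =====
-- def translate_nucleotide_position_into_codon_position(sequence, nucleotide_position):
--
--     '''
--     params:
--         sequence: string, nucleotide sequence
--         nucleotide_position: integer, position of nucleotide that you want to translate into the codon position
--     returns:
--         count: integer, position of codon containing nucleotide from nucleotide position
--     '''
--
--     count = 0
--     # since position of first letter in string is zero, function has to be adapted accordingly
--     for n in range(0,len(sequence)):
--
--         if nucleotide_position - 3 >= 0:
--             count = count +1
--             nucleotide_position = nucleotide_position - 3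
--         else:
--             break
--
--     return(count)
-- ===== SOURCE B (Python) =====
-- def translate_nucleotide_position_into_codon_position(sequence, nucleotide_position):
--     # closed form: how many whole 3s fit, clamped to [0, len(sequence)]
--     return max(0, min(len(sequence), nucleotide_position // 3))
-- ===== Notes on version B (the rewrite author's own statement) =====
-- stated objective: simpler
-- what changed: Replaced the per-character subtract-3 loop with a closed-form max(0, min(len(sequence), nucleotide_position // 3)).
import Mathlib
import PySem

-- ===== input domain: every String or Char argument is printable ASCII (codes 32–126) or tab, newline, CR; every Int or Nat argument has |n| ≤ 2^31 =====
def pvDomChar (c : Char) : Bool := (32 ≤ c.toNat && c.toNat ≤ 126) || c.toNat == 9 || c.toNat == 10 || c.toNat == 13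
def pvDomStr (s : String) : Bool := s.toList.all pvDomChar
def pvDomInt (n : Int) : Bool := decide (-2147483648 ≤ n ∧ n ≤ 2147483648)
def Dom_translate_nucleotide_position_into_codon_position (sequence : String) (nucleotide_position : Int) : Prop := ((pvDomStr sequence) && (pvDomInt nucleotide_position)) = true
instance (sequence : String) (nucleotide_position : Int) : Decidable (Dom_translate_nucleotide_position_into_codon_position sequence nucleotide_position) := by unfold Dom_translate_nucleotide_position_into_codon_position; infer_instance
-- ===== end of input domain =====

-- B replaces A's per-character subtract-3 loop with a clamped closed form (simpler, O(1)).

-- ===== PORT A =====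
-- the for-loop over range(0, len(sequence)) with early break, state (count, nucleotide_position)
def tnposLoop : Nat → Int → Int → Int
  | 0, count, _ => count
  | n+1, count, pos => if pos - 3 ≥ 0 then tnposLoop n (count + 1) (pos - 3) else count

def translate_nucleotide_position_into_codon_position (sequence : String) (nucleotide_position : Int) : Int :=
  tnposLoop sequence.toList.length 0 nucleotide_position

-- ===== PORT B =====
def translate_nucleotide_position_into_codon_position_alt (sequence : String) (nucleotide_position : Int) : Int :=
  max 0 (min (sequence.toList.length : Int) (PySem.Int.floordiv nucleotide_position 3))

-- ===== PRECONDITION & SPEC =====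
def Spec_translate_nucleotide_position_into_codon_position (sequence : String) (nucleotide_position : Int) (out : Int) : Prop := out = translate_nucleotide_position_into_codon_position_alt sequence nucleotide_position
instance (sequence : String) (nucleotide_position : Int) (out : Int) : Decidable (Spec_translate_nucleotide_position_into_codon_position sequence nucleotide_position out) := by unfold Spec_translate_nucleotide_position_into_codon_position; infer_instance

-- ===== CLAIM (what is proved, stated in full; the proofs are below) =====
def Claim_equal_translate_nucleotide_position_into_codon_position : Prop := ∀ (sequence : String) (nucleotide_position : Int), Dom_translate_nucleotide_position_into_codon_position sequence nucleotide_position → Spec_translate_nucleotide_position_into_codon_position sequence nucleotide_position (translate_nucleotide_position_into_codon_position sequence nucleotide_position)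

-- ===== LEMMAS AND PROOFS =====
theorem tnposLoop_eq (n : Nat) : ∀ (count pos : Int),
    tnposLoop n count pos = count + max 0 (min (n : Int) (pos / 3)) := by
  induction n with
  | zero => intro count pos; simp [tnposLoop]
  | succ m ih =>
    intro count pos
    simp only [tnposLoop]
    split_ifs with h
    · rw [ih]; omega
    · omega

-- ===== VERDICT (by name: the statement is the Claim_ definition above) =====
theorem translate_nucleotide_position_into_codon_position_spec : Claim_equal_translate_nucleotide_position_into_codon_position := by
  intro sequence pos _
  unfold Spec_translate_nucleotide_position_into_codon_position
    translate_nucleotide_position_into_codon_position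
    translate_nucleotide_position_into_codon_position_alt
  rw [tnposLoop_eq, PySem.Int.floordiv_eq_ediv_of_pos (by norm_num)]
  omega
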